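-- pv_equiv track=rewrite | github.com/seokulee/algorithm-study | seokulee/w16/1450.py | mitm
-- ===== SOURCE A (Python) =====
-- import bisect
-- from itertools import combinations
--
-- def mitm(N, C, W):
--     if N == 1 and W[0] <= C:
--         return 2
--     if N == 1 and W[0] > 0:
--         return 1
--
--     left, right = W[:N//2], W[N//2:]
--     sub_a, sub_b = [0],[0]
--
--     for i in range(1,len(left)+1):
--         for sub in combinations(left,i):
--             sub_a.append(sum(sub))
--     sub_a = sorted(sub_a)
--
--     for i in range(1,len(right)+1):
--         for sub in combinations(right,i):
--             sub_b.append(sum(sub))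
--     sub_b = sorted(sub_b)
--
--     answer = 0
--
--     for i in sub_a:
--         if C - i < 0:
--             continue
--
--         idx = bisect.bisect_right(sub_b, C - i)
--         answer += idx
--
--     return answer
-- ===== SOURCE B (Python) =====
-- def mitm(N, C, W):
--     if N == 1 and W[0] <= C:
--         return 2
--     if N == 1 and W[0] > 0:
--         return 1
--
--     left, right = W[:N//2], W[N//2:]
--
--     # build each half's subset sums by incremental doubling instead of
--     # enumerating combinations of every size
--     sums_a = [0]
--     for w in left:
--         sums_a += [s + w for s in sums_a]
--     sums_b = [0]
--     for w in right:
--         sums_b += [s + w for s in sums_b]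
--     sums_a.sort()
--     sums_b.sort()
--
--     # one two-pointer sweep instead of a bisect per element:
--     # walk sums_a ascending; k advances through sums_b in descending order
--     # past every b > C - a, so len - k elements remain with b <= C - a
--     bs = sums_b[::-1]
--     answer = 0
--     k = 0
--     for a in sums_a:
--         if a > C:
--             break
--         while k < len(bs) and bs[k] > C - a:
--             k += 1
--         answer += len(bs) - k
--     return answer
-- ===== Notes on version B (the rewrite author's own statement) =====
-- stated objective: faster
-- what changed: B builds each half's subset sums by incremental doubling (sums += [s+w for s in sums]) instead of enumerating and summing itertools.combinations of every size, and counts the pairs with one two-pointer sweep over the two sorted lists (walking sums_b downward as sums_a ascends, breaking once a > C) instead of a bisect per element.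
import Mathlib
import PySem

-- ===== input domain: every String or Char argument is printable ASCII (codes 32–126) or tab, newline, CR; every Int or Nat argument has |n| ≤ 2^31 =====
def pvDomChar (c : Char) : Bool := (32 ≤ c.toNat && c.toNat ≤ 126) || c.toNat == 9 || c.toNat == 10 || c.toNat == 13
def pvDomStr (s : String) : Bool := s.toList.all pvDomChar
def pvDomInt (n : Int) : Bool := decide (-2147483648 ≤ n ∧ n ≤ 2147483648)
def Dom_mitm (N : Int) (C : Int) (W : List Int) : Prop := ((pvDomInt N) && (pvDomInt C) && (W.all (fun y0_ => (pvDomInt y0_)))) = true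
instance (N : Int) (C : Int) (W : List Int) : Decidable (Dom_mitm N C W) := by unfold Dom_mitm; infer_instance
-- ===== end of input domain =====

-- B replaces the per-size combinations enumeration by incremental subset-sum
-- doubling and the per-element bisect by a single two-pointer sweep (objective:
-- faster by constant factor; a timing run decides the label).

-- ===== PORT A =====

-- the two nested loops appending sum(sub) for every combination of each size,
-- starting from sub_a = [0]; 'i.toNat' is exact: pyRange 1 (len+1) yields only positive i
def combSums (xs : List Int) : List Int :=
  (PySem.List.pyRange 1 ((xs.length : Int) + 1) 1).foldl
    (fun acc i =>
      (PySem.List.combinations xs i.toNat).foldl (fun acc2 sub => acc2 ++ [sub.sum]) acc)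
    [0]

-- the body after the N == 1 guards (left/right already sliced)
def mitmMain (C : Int) (left right : List Int) : Int :=
  let sub_a := PySem.List.sorted (combSums left) (fun x => x) false
  let sub_b := PySem.List.sorted (combSums right) (fun x => x) false
  sub_a.foldl
    (fun answer i =>
      if C - i < 0 then answer
      else answer + ((PySem.List.bisectRight sub_b (C - i) : Nat) : Int))
    0

def mitm (N : Int) (C : Int) (W : List Int) : Int :=
  if N = 1 then
    match PySem.List.pyGet? W 0 with
    | none => 0   -- W[0] raises IndexError here; excluded by Pre_mitm
    | some w0 =>
      if w0 ≤ C then 2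
      else if 0 < w0 then 1
      else mitmMain C (PySem.List.slice W none (some (PySem.Int.floordiv N 2)))
                      (PySem.List.slice W (some (PySem.Int.floordiv N 2)) none)
  else mitmMain C (PySem.List.slice W none (some (PySem.Int.floordiv N 2)))
                  (PySem.List.slice W (some (PySem.Int.floordiv N 2)) none)

-- ===== PORT B =====

-- subset sums by doubling: for each weight, append the shifted copy
def altSums (xs : List Int) : List Int :=
  xs.foldl (fun sums w => sums ++ sums.map (fun s => s + w)) [0]

-- the two-pointer sweep: 'as' ascending, 'bs' the descending remainder of sums_b
-- (the Python pointer k is the number of elements already dropped from the front);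
-- the inner while loop is the dropWhile, 'break' is the early 0
def altSweep (C : Int) : List Int → List Int → Int
  | [], _ => 0
  | a :: as, bs =>
    if C < a then 0
    else
      let bs' := bs.dropWhile (fun b => decide (C - a < b))
      ((bs'.length : Nat) : Int) + altSweep C as bs'

def altMain (C : Int) (left right : List Int) : Int :=
  let sums_a := PySem.List.sorted (altSums left) (fun x => x) false
  let sums_b := PySem.List.sorted (altSums right) (fun x => x) false
  altSweep C sums_a sums_b.reverse   -- sums_b[::-1]

def mitm_alt (N : Int) (C : Int) (W : List Int) : Int :=
  if N = 1 then
    match PySem.List.pyGet? W 0 with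
    | none => 0   -- W[0] raises IndexError here; excluded by Pre_mitm
    | some w0 =>
      if w0 ≤ C then 2
      else if 0 < w0 then 1
      else altMain C (PySem.List.slice W none (some (PySem.Int.floordiv N 2)))
                     (PySem.List.slice W (some (PySem.Int.floordiv N 2)) none)
  else altMain C (PySem.List.slice W none (some (PySem.Int.floordiv N 2)))
                 (PySem.List.slice W (some (PySem.Int.floordiv N 2)) none)

-- ===== PRECONDITION & SPEC =====
-- Pre_ excludes only N == 1 with empty W, where A (and B) raise IndexError on W[0]
def Pre_mitm (N : Int) (C : Int) (W : List Int) : Prop := ¬ (N = 1 ∧ W = [])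
instance (N : Int) (C : Int) (W : List Int) : Decidable (Pre_mitm N C W) := by
  unfold Pre_mitm; infer_instance

def pvWitness_mitm : Int × Int × List Int := (4, 7, [2, 5, 3, 1])

def Spec_mitm (N : Int) (C : Int) (W : List Int) (out : Int) : Prop := out = mitm_alt N C W
instance (N : Int) (C : Int) (W : List Int) (out : Int) : Decidable (Spec_mitm N C W out) := by
  unfold Spec_mitm; infer_instance

-- ===== CLAIM (what is proved, stated in full; the proofs are below) =====
def Claim_equal_mitm : Prop :=
  ∀ (N : Int) (C : Int) (W : List Int), Dom_mitm N C W → Pre_mitm N C W → Spec_mitm N C W (mitm N C W)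

-- ===== LEMMAS AND PROOFS =====

-- bisect_right on a sorted list counts the elements ≤ x
theorem bisectRight_eq_countP (xs : List Int) (x : Int)
    (h : xs.Pairwise (· ≤ ·)) :
    (PySem.List.bisectRight xs x : Nat) = xs.countP (fun b => decide (b ≤ x)) := by
  obtain ⟨hle, hlt, hgt⟩ := PySem.List.bisectRight_spec xs x h
  set r := PySem.List.bisectRight xs x with hr
  conv_rhs => rw [← List.take_append_drop r xs]
  rw [List.countP_append]
  have h1 : (xs.take r).countP (fun b => decide (b ≤ x)) = r := by
    have hlen : (xs.take r).length = r := by simp [hle]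
    have hall : (xs.take r).countP (fun b => decide (b ≤ x)) = (xs.take r).length := by
      rw [List.countP_eq_length]
      intro a ha
      rw [List.mem_iff_getElem] at ha
      obtain ⟨i, hi, rfl⟩ := ha
      rw [List.getElem_take]
      have hir : i < r := by omega
      simpa using hlt i (by omega) hir
    rw [hall, hlen]
  have h2 : (xs.drop r).countP (fun b => decide (b ≤ x)) = 0 := by
    rw [List.countP_eq_zero]
    intro a ha
    rw [List.mem_iff_getElem] at ha
    obtain ⟨i, hi, rfl⟩ := ha
    rw [List.getElem_drop]
    have := hgt (r + i) (by simp at hi; omega) (by omega)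
    simp
    omega
  omega

-- pyRange 1 (n+1) is the positive integers 1..n
theorem pyRange_one_succ (n : Nat) :
    PySem.List.pyRange 1 ((n : Int) + 1) 1 = (List.range n).map (fun k : Nat => ((k : Int) + 1)) := by
  induction n with
  | zero => decide
  | succ m ih =>
    rw [List.range_succ, List.map_append]
    rw [show ((((m : Nat) + 1 : Nat)) : Int) + 1 = ((m : Int) + 1) + 1 by push_cast; ring]
    rw [PySem.List.pyRange_one_succ_right (by omega)]
    simp [ih]

-- pointwise-permutation congruence for flatMap
theorem flatMap_perm_congr {α β : Type} (l : List α) (f g : α → List β)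
    (h : ∀ a ∈ l, (f a).Perm (g a)) : (l.flatMap f).Perm (l.flatMap g) := by
  induction l with
  | nil => simp
  | cons a t ih =>
    simp only [List.flatMap_cons]
    exact (h a (by simp)).append (ih (fun x hx => h x (by simp [hx])))

-- PySem.List.combinations enumerates the same sublists as Mathlib's sublistsLen
theorem combinations_perm_sublistsLen (xs : List Int) (k : Nat) :
    (PySem.List.combinations xs k).Perm (List.sublistsLen k xs) := by
  induction xs generalizing k with
  | nil => cases k <;> simp [PySem.List.combinations_zero, PySem.List.combinations_nil_succ]
  | cons x t ih =>
    cases k with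
    | zero => simp [PySem.List.combinations_zero]
    | succ m =>
      rw [PySem.List.combinations_cons_succ, List.sublistsLen_succ_cons]
      exact (((ih m).map _).append (ih (m+1))).trans (List.perm_append_comm)

-- the doubling fold respects permutation of the accumulator
theorem foldl_dbl_perm {acc acc' : List Int} (xs : List Int) (h : acc.Perm acc') :
    (xs.foldl (fun sums w => sums ++ sums.map (fun s => s + w)) acc).Perm
      (xs.foldl (fun sums w => sums ++ sums.map (fun s => s + w)) acc') := by
  induction xs generalizing acc acc' with
  | nil => simpa using h
  | cons x t ih => exact ih (h.append (h.map _))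

-- the doubling fold commutes with a constant shift of the accumulator
theorem foldl_dbl_map (xs : List Int) (acc : List Int) (x : Int) :
    xs.foldl (fun sums w => sums ++ sums.map (fun s => s + w)) (acc.map (fun s => s + x))
      = (xs.foldl (fun sums w => sums ++ sums.map (fun s => s + w)) acc).map (fun s => s + x) := by
  induction xs generalizing acc with
  | nil => rfl
  | cons w t ih =>
    simp only [List.foldl_cons]
    rw [← ih]
    congr 1
    simp only [List.map_map, List.map_append]
    congr 1
    apply List.map_congr_left; intro a _; simp [Function.comp]; ring

-- the doubling fold distributes over an appended seed, up to permutation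
theorem foldl_dbl_append (xs : List Int) (a1 a2 : List Int) :
    (xs.foldl (fun sums w => sums ++ sums.map (fun s => s + w)) (a1 ++ a2)).Perm
      (xs.foldl (fun sums w => sums ++ sums.map (fun s => s + w)) a1
        ++ xs.foldl (fun sums w => sums ++ sums.map (fun s => s + w)) a2) := by
  induction xs generalizing a1 a2 with
  | nil => rfl
  | cons w t ih =>
    simp only [List.foldl_cons, List.map_append]
    refine (foldl_dbl_perm t ?_).trans (ih _ _)
    rw [List.append_assoc, List.append_assoc]
    exact (List.perm_append_comm_assoc a2 (a1.map (fun s => s + w)) (a2.map (fun s => s + w))).append_left a1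

-- the doubling fold produces exactly the sums of all sublists
theorem altSums_perm_sublists' (xs : List Int) :
    (altSums xs).Perm ((List.sublists' xs).map List.sum) := by
  induction xs with
  | nil => simp [altSums]
  | cons x t ih =>
    have h1 : altSums (x :: t)
        = t.foldl (fun sums w => sums ++ sums.map (fun s => s + w)) ([0] ++ [0].map (fun s => s + x)) := rfl
    have h2 := (foldl_dbl_append t [0] ([0].map (fun s => s + x)))
    rw [foldl_dbl_map] at h2
    rw [h1]
    refine h2.trans ?_
    rw [List.sublists'_cons, List.map_append]
    refine (ih.append (ih.map _)).trans ?_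
    apply List.Perm.append_left
    rw [List.map_map, List.map_map]
    apply List.Perm.of_eq
    apply List.map_congr_left
    intro a _
    simp [List.sum_cons]
    ring

-- A's combinations enumeration produces the same multiset of sums
theorem combSums_perm_altSums (xs : List Int) :
    (combSums xs).Perm (altSums xs) := by
  have hflat : combSums xs
      = [0] ++ (PySem.List.pyRange 1 ((xs.length : Int) + 1) 1).flatMap
          (fun i => (PySem.List.combinations xs i.toNat).map List.sum) := by
    unfold combSums
    rw [← PySem.List.foldl_append_eq_flatMap]
    apply PySem.List.foldl_congr_mem
    intro acc i _
    rw [PySem.List.foldl_append_singleton_eq_map]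
  rw [hflat, pyRange_one_succ, List.flatMap_map]
  have hstep : ((List.range xs.length).flatMap
      (fun k : Nat => (PySem.List.combinations xs ((k : Int) + 1).toNat).map List.sum)).Perm
        ((List.range xs.length).flatMap
      (fun k : Nat => (List.sublistsLen (k + 1) xs).map List.sum)) := by
    apply flatMap_perm_congr
    intro k _
    have : ((k : Int) + 1).toNat = k + 1 := by omega
    rw [this]
    exact (combinations_perm_sublistsLen xs (k + 1)).map _
  refine (hstep.append_left _).trans ?_
  have hall : (((List.range (xs.length + 1)).flatMap
      (fun k => List.sublistsLen k xs)).map List.sum).Perm ((List.sublists' xs).map List.sum) :=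
    (List.range_bind_sublistsLen_perm xs).map _
  refine List.Perm.trans ?_ (List.Perm.trans hall (altSums_perm_sublists' xs).symm)
  rw [List.range_succ_eq_map, List.flatMap_cons, List.map_append, List.flatMap_map]
  simp only [List.sublistsLen_zero, List.map_cons, List.map_nil, List.map_flatMap]
  rfl

-- elements dropped at a higher threshold never matter at a lower one
theorem countP_dropWhile_le (d : List Int) (t1 t2 : Int) (h : t2 ≤ t1) :
    (d.dropWhile (fun b => decide (t1 < b))).countP (fun b => decide (b ≤ t2))
      = d.countP (fun b => decide (b ≤ t2)) := by
  conv_rhs => rw [← List.takeWhile_append_dropWhile (p := fun b => decide (t1 < b)) (l := d)]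
  rw [List.countP_append]
  have : (d.takeWhile (fun b => decide (t1 < b))).countP (fun b => decide (b ≤ t2)) = 0 := by
    rw [List.countP_eq_zero]
    intro a ha
    have := List.mem_takeWhile_imp ha
    simp at this ⊢
    omega
  omega

-- dropping the > t prefix of a descending list leaves exactly the elements ≤ t
theorem length_dropWhile_desc (d : List Int) (t : Int)
    (hd : d.Pairwise (fun x y => y ≤ x)) :
    (d.dropWhile (fun b => decide (t < b))).length = d.countP (fun b => decide (b ≤ t)) := by
  induction d with
  | nil => rfl
  | cons b d ih =>
    rcases List.pairwise_cons.mp hd with ⟨hb, hd'⟩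
    by_cases hbt : t < b
    · rw [List.dropWhile_cons_of_pos (by simpa using hbt)]
      rw [show (List.countP (fun b => decide (b ≤ t)) (b :: d)) = List.countP (fun b => decide (b ≤ t)) d by
        simp [List.countP_cons]; omega]
      exact ih hd'
    · rw [List.dropWhile_cons_of_neg (by simpa using hbt)]
      have hall : d.countP (fun b => decide (b ≤ t)) = d.length := by
        rw [List.countP_eq_length]
        intro a ha
        have := hb a ha
        simp; omega
      simp [List.countP_cons, hall]
      omega

-- the two-pointer sweep computes A's per-element counting loop
theorem sweep_eq (C : Int) (BS : List Int) :
    ∀ (as d : List Int) (acc : Int), as.Pairwise (· ≤ ·) →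
      d.Pairwise (fun x y => y ≤ x) →
      (∀ a' ∈ as, BS.countP (fun b => decide (b ≤ C - a')) = d.countP (fun b => decide (b ≤ C - a'))) →
      as.foldl (fun answer i => if C - i < 0 then answer
                 else answer + ((BS.countP (fun b => decide (b ≤ C - i)) : Nat) : Int)) acc
        = acc + altSweep C as d := by
  intro as
  induction as with
  | nil => intro d acc _ _ _; simp [altSweep]
  | cons a as ih =>
    intro d acc hasc hdesc hc
    rcases List.pairwise_cons.mp hasc with ⟨ha, hasc'⟩
    rw [List.foldl_cons]
    by_cases hca : C < a
    · rw [if_pos (by omega)]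
      rw [show altSweep C (a :: as) d = 0 by simp [altSweep, hca]]
      have : ∀ acc', as.foldl (fun answer i => if C - i < 0 then answer
                 else answer + ((BS.countP (fun b => decide (b ≤ C - i)) : Nat) : Int)) acc' = acc' := by
        intro acc'
        rw [PySem.List.foldl_congr_mem (g := fun acc _ => acc), PySem.List.foldl_ignore]
        intro acc' x hx
        rw [if_pos (by have := ha x hx; omega)]
      rw [this]; ring
    · rw [if_neg (by omega)]
      rw [show altSweep C (a :: as) d
          = (((d.dropWhile (fun b => decide (C - a < b))).length : Nat) : Int)
            + altSweep C as (d.dropWhile (fun b => decide (C - a < b))) by simp [altSweep, hca]]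
      set d' := d.dropWhile (fun b => decide (C - a < b)) with hd'
      have hdesc' : d'.Pairwise (fun x y => y ≤ x) :=
        hdesc.sublist (List.dropWhile_sublist _)
      have hc' : ∀ a' ∈ as, BS.countP (fun b => decide (b ≤ C - a')) = d'.countP (fun b => decide (b ≤ C - a')) := by
        intro a' ha'
        rw [hc a' (by simp [ha']), hd', countP_dropWhile_le d (C - a) (C - a') (by have := ha a' ha'; omega)]
      rw [ih d' _ hasc' hdesc' hc']
      rw [length_dropWhile_desc d (C - a) hdesc, ← hc a (by simp)]
      ring

-- the general (post-guard) bodies agree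
theorem main_eq (C : Int) (left right : List Int) :
    mitmMain C left right = altMain C left right := by
  unfold mitmMain altMain
  have hsa : PySem.List.sorted (combSums left) (fun x => x) false
      = PySem.List.sorted (altSums left) (fun x => x) false :=
    PySem.List.sorted_eq_sorted_of_perm _ _ _ (fun a b h => h) (combSums_perm_altSums left)
  have hsb : PySem.List.sorted (combSums right) (fun x => x) false
      = PySem.List.sorted (altSums right) (fun x => x) false :=
    PySem.List.sorted_eq_sorted_of_perm _ _ _ (fun a b h => h) (combSums_perm_altSums right)
  rw [hsa, hsb]
  set sa := PySem.List.sorted (altSums left) (fun x => x) false with hsa'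
  set sb := PySem.List.sorted (altSums right) (fun x => x) false with hsb'
  have hpa : sa.Pairwise (· ≤ ·) := PySem.List.sorted_pairwise _ _
  have hpb : sb.Pairwise (· ≤ ·) := PySem.List.sorted_pairwise _ _
  have hbis : sa.foldl (fun answer i =>
      if C - i < 0 then answer
      else answer + ((PySem.List.bisectRight sb (C - i) : Nat) : Int)) 0
    = sa.foldl (fun answer i =>
      if C - i < 0 then answer
      else answer + ((sb.countP (fun b => decide (b ≤ C - i)) : Nat) : Int)) 0 := by
    apply PySem.List.foldl_congr_mem
    intro acc i _
    rw [bisectRight_eq_countP sb (C - i) hpb]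
  rw [hbis]
  rw [sweep_eq C sb sa sb.reverse 0 hpa ?_ ?_]
  · ring
  · rw [List.pairwise_reverse]
    exact hpb
  · intro a' _
    exact ((List.reverse_perm sb).countP_eq _).symm

-- ===== VERDICT (by name: the statement is the Claim_ definition above) =====
theorem mitm_spec : Claim_equal_mitm := by
  intro N C W _hDom hPre
  unfold Spec_mitm mitm mitm_alt
  by_cases hN : N = 1
  · simp only [hN, if_pos]
    cases hW : PySem.List.pyGet? W 0 with
    | none => rfl
    | some w0 =>
      by_cases h1 : w0 ≤ C
      · simp [h1]
      · by_cases h2 : 0 < w0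
        · simp [h1, h2]
        · simp [h1, h2, main_eq]
  · simp [hN, main_eq]
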